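-- pv_equiv track=rewrite | github.com/MasterMo830/MSU_html_vote_compilator | compilator.py | count_first_place
-- ===== SOURCE A (Python) =====
-- def count_first_place(ballots, all_candidates):
--     vote_counts = {name: 0 for name in all_candidates}
--     for ballot in ballots:
--         for name in ballot:
--             if name in all_candidates:
--                 vote_counts[name] += 1
--                 break
--     return vote_counts
-- ===== SOURCE B (Python) =====
-- def count_first_place(ballots, all_candidates):
--     counts = dict.fromkeys(all_candidates, 0)
--     cand_set = set(all_candidates)
--     for ballot in ballots:
--         # index the ballot once: first-occurrence position of every name
--         pos = {}
--         for i, name in enumerate(ballot):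
--             if name not in pos:
--                 pos[name] = i
--         # argmin over the table's candidate entries
--         best = None
--         for name, i in pos.items():
--             if name in cand_set and (best is None or i < best[1]):
--                 best = (name, i)
--         if best is not None:
--             counts[best[0]] += 1
--     return counts
-- ===== Notes on version B (the rewrite author's own statement) =====
-- stated objective: alternative
-- what changed: Instead of scanning each ballot left-to-right and breaking at the first name found by a list-membership test, B indexes each ballot once into a first-occurrence position table and takes the argmin over the table's candidate entries (set membership), tallying winners into a zero-initialised table.
import Mathlib
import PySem

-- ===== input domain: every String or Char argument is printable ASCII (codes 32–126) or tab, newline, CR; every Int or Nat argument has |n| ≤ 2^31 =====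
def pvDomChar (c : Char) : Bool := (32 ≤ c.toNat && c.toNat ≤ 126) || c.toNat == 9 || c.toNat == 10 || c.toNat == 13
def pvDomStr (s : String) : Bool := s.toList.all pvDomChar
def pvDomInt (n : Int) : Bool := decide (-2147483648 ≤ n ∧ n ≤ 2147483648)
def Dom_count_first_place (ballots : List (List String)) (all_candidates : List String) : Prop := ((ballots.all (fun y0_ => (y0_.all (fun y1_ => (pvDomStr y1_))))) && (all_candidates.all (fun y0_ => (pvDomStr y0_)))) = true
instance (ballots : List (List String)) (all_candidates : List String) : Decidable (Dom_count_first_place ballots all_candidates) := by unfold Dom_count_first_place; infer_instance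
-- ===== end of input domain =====

-- B replaces A's scan-each-ballot-until-a-candidate-matches loop by indexing each ballot's first-occurrence positions once and taking the argmin over the table's candidate entries (alternative algorithm, same results).


-- ===== PORT A =====
-- inner 'for name in ballot: if name in all_candidates: vote_counts[name] += 1; break'
def cfpBallotA (d : PySem.Dict String Int) (ballot : List String) (all_candidates : List String) : PySem.Dict String Int :=
  match ballot with
  | [] => d
  | name :: rest =>
      if all_candidates.contains name then d.modify name 0 (· + 1)
      else cfpBallotA d rest all_candidates

def count_first_place (ballots : List (List String)) (all_candidates : List String) : List (String × Int) :=
  let vote_counts := all_candidates.foldl (fun d name => d.insert name 0) PySem.Dict.empty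
  (ballots.foldl (fun d ballot => cfpBallotA d ballot all_candidates) vote_counts).items

-- ===== PORT B =====
-- 'for i, name in enumerate(ballot): if name not in pos: pos[name] = i'  (recursion with an explicit index counter)
def cfpBuildPos (ballot : List String) (i : Int) (d : PySem.Dict String Int) : PySem.Dict String Int :=
  match ballot with
  | [] => d
  | name :: rest => cfpBuildPos rest (i + 1) (if d.contains name then d else d.insert name i)

-- 'for name, i in pos.items(): if name in cand_set and (best is None or i < best[1]): best = (name, i)'
def cfpBest (l : List (String × Int)) (cands : PySem.Set String) (best : Option (String × Int)) : Option (String × Int) :=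
  match l with
  | [] => best
  | (name, i) :: rest =>
      cfpBest rest cands
        (if PySem.Set.contains cands name &&
            (match best with | none => true | some b => decide (i < b.2)) then some (name, i) else best)

def count_first_place_alt (ballots : List (List String)) (all_candidates : List String) : List (String × Int) :=
  let counts0 := all_candidates.foldl (fun d name => d.insert name 0) PySem.Dict.empty  -- dict.fromkeys(all_candidates, 0)
  let cand_set : PySem.Set String := PySem.Set.ofList all_candidates
  (ballots.foldl (fun counts ballot =>
      let pos := cfpBuildPos ballot 0 PySem.Dict.empty
      match cfpBest pos.items cand_set none with
      | some b => counts.modify b.1 0 (· + 1)  -- counts[best[0]] += 1 (best[0] is always a key, so modify with default 0 is exact)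
      | none => counts) counts0).items

-- ===== PRECONDITION & SPEC =====
def Spec_count_first_place (ballots : List (List String)) (all_candidates : List String) (out : List (String × Int)) : Prop := out = count_first_place_alt ballots all_candidates
instance (ballots : List (List String)) (all_candidates : List String) (out : List (String × Int)) : Decidable (Spec_count_first_place ballots all_candidates out) := by unfold Spec_count_first_place; infer_instance

-- ===== CLAIM (what is proved, stated in full; the proofs are below) =====
def Claim_equal_count_first_place : Prop := ∀ (ballots : List (List String)) (all_candidates : List String), Dom_count_first_place ballots all_candidates → Spec_count_first_place ballots all_candidates (count_first_place ballots all_candidates)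

-- ===== LEMMAS AND PROOFS =====

-- A's inner loop computes find?-then-modify
lemma cfpBallotA_eq_find (d : PySem.Dict String Int) (ballot all_candidates : List String) :
    cfpBallotA d ballot all_candidates =
      (ballot.find? (fun n => all_candidates.contains n)).elim d (fun n => d.modify n 0 (· + 1)) := by
  induction ballot with
  | nil => rfl
  | cons x xs ih =>
      by_cases h : x ∈ all_candidates
      · simp [cfpBallotA, List.contains_eq_mem, h]
      · simp [cfpBallotA, List.contains_eq_mem, h, ih]

-- the position dict reads the first-occurrence index (offset by i), existing keys kept
lemma cfpBuildPos_get? (ballot : List String) (i : Int) (d : PySem.Dict String Int) (name : String) :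
    (cfpBuildPos ballot i d).get? name =
      (match d.get? name with
       | some v => some v
       | none => (ballot.findIdx? (· == name)).map (fun k => i + (k : Int))) := by
  induction ballot generalizing i d with
  | nil => cases h : d.get? name <;> simp [cfpBuildPos, h]
  | cons x xs ih =>
      rw [cfpBuildPos, ih, List.findIdx?_cons]
      by_cases hx : x = name
      · subst hx
        by_cases hc : d.contains x
        · have hs : (d.get? x).isSome := by rw [← PySem.Dict.contains_eq_isSome_get?]; exact hc
          obtain ⟨v, hv⟩ := Option.isSome_iff_exists.mp hs
          simp [hc, hv]
        · have hg : d.get? x = none := by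
            have := PySem.Dict.contains_eq_isSome_get? d x
            cases h : d.get? x
            · rfl
            · rw [h] at this; simp [this] at hc
          simp [hc, hg, PySem.Dict.get?_insert_self]
      · have hbe : (x == name) = false := by simp [hx]
        have hget : (if d.contains x then d else d.insert x i).get? name = d.get? name := by
          split
          · rfl
          · exact PySem.Dict.get?_insert_of_ne _ i (Ne.symm hx)
        rw [hget, hbe]
        cases h : d.get? name
        · simp only [Bool.false_eq_true, if_false]
          cases hf : xs.findIdx? (· == name) <;> simp
          ring
        · simp

-- if no candidate is in pos, the argmin loop returns none
lemma cfpBest_nomatch (cands : PySem.Set String) :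
    ∀ l : List (String × Int), (∀ p ∈ l, PySem.Set.contains cands p.1 = false) →
      cfpBest l cands none = none := by
  intro l
  induction l with
  | nil => intro _; rfl
  | cons p rest ih =>
      intro h
      obtain ⟨name, i⟩ := p
      simp only [cfpBest, h (name, i) (List.mem_cons_self), Bool.false_and, Bool.false_eq_true, if_false]
      exact ih (fun q hq => h q (List.mem_cons_of_mem _ hq))

lemma cfpBest_argmin (cands : PySem.Set String) (n : String) (j : Int)
    (hcn : PySem.Set.contains cands n = true) :
    ∀ (l : List (String × Int)) (best : Option (String × Int)),
      (∀ p ∈ l, PySem.Set.contains cands p.1 = true → j ≤ p.2 ∧ (p.2 = j → p.1 = n)) →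
      (∀ p ∈ l, p.1 = n → p.2 = j) →
      (best = none ∨ ∃ c i, best = some (c, i) ∧ j ≤ i ∧ (i = j → c = n)) →
      ((n, j) ∈ l ∨ best = some (n, j)) →
      cfpBest l cands best = some (n, j) := by
  intro l
  induction l with
  | nil =>
      intro best _ _ _ hmem
      rcases hmem with hmem | hmem
      · cases hmem
      · rw [cfpBest, hmem]
  | cons p rest ih =>
      intro best h1 h2 hinv hmem
      obtain ⟨c, i⟩ := p
      simp only [cfpBest]
      have h1' : ∀ q ∈ rest, PySem.Set.contains cands q.1 = true → j ≤ q.2 ∧ (q.2 = j → q.1 = n) :=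
        fun q hq => h1 q (List.mem_cons_of_mem _ hq)
      have h2' : ∀ q ∈ rest, q.1 = n → q.2 = j :=
        fun q hq => h2 q (List.mem_cons_of_mem _ hq)
      cases hc : PySem.Set.contains cands c with
      | false =>
          simp only [Bool.false_and, Bool.false_eq_true, if_false]
          refine ih best h1' h2' hinv ?_
          rcases hmem with hmem | hmem
          · rcases List.mem_cons.mp hmem with hh | hmem
            · exfalso
              have hcne : c = n := (congrArg Prod.fst hh).symm
              rw [hcne, hcn] at hc; cases hc
            · exact Or.inl hmem
          · exact Or.inr hmem
      | true =>
          obtain ⟨hji0', hieq0'⟩ := h1 (c, i) (List.mem_cons_self) hc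
          have hji : j ≤ i := hji0'
          have hieq : i = j → c = n := hieq0'
          cases best with
          | none =>
              simp only [hc, Bool.true_and, decide_true, if_true]
              by_cases hij : i = j
              · exact ih _ h1' h2' (Or.inr ⟨c, i, rfl, hji, hieq⟩)
                  (Or.inr (by rw [hieq hij, hij]))
              · refine ih _ h1' h2' (Or.inr ⟨c, i, rfl, hji, hieq⟩) ?_
                rcases hmem with hmem | hmem
                · rcases List.mem_cons.mp hmem with hh | hmem
                  · exfalso
                    have hcn' : c = n := (congrArg Prod.fst hh).symm
                    exact hij (h2 (c, i) (List.mem_cons_self) hcn')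
                  · exact Or.inl hmem
                · cases hmem
          | some b =>
              obtain ⟨c0, i0, hb, hji0, hieq0⟩ := hinv.resolve_left (by simp)
              rw [Option.some_inj] at hb
              subst hb
              by_cases hlt : i < i0
              · simp only [hc, Bool.true_and, hlt, decide_true, if_true]
                by_cases hij : i = j
                · exact ih _ h1' h2' (Or.inr ⟨c, i, rfl, hji, hieq⟩)
                    (Or.inr (by rw [hieq hij, hij]))
                · refine ih _ h1' h2' (Or.inr ⟨c, i, rfl, hji, hieq⟩) ?_
                  rcases hmem with hmem | hmem
                  · rcases List.mem_cons.mp hmem with hh | hmem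
                    · exact absurd (h2 (c, i) (List.mem_cons_self) ((congrArg Prod.fst hh).symm)) hij
                    · exact Or.inl hmem
                  · have hi0 : i0 = j := by
                      have h := Option.some_inj.mp hmem
                      exact congrArg Prod.snd h
                    subst hi0
                    exact absurd hji (not_le.mpr hlt)
              · simp only [hc, Bool.true_and, hlt, decide_false, if_false]
                refine ih _ h1' h2' (Or.inr ⟨c0, i0, rfl, hji0, hieq0⟩) ?_
                rcases hmem with hmem | hmem
                · rcases List.mem_cons.mp hmem with hh | hmem
                  · have hcn' : c = n := (congrArg Prod.fst hh).symm
                    have hij : i = j := h2 (c, i) (List.mem_cons_self) hcn'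
                    have : i0 = j := le_antisymm (by omega) hji0
                    exact Or.inr (by rw [hieq0 this, this]; simp)
                  · exact Or.inl hmem
                · exact Or.inr hmem

-- the position dict's keys stay unique
lemma cfpBuildPos_nodup : ∀ (ballot : List String) (i : Int) (d : PySem.Dict String Int),
    d.keys.Nodup → (cfpBuildPos ballot i d).keys.Nodup := by
  intro ballot
  induction ballot with
  | nil => intro i d h; exact h
  | cons x xs ih =>
      intro i d h
      rw [cfpBuildPos]
      refine ih _ _ ?_
      split
      · exact h
      · exact PySem.Dict.nodup_keys_insert _ _ _ h

-- from find? = some n: the index of n is minimal among all p-satisfying names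
lemma find?_min_idx {p : String → Bool} :
    ∀ {l : List String} {n : String}, l.find? p = some n →
      ∃ j : Nat, l.findIdx? (· == n) = some j ∧
        (∀ c, p c = true → ∀ k, l.findIdx? (· == c) = some k → j ≤ k ∧ (k = j → c = n)) := by
  intro l
  induction l with
  | nil => intro n h; cases h
  | cons x xs ih =>
      intro n h
      by_cases hpx : p x
      · rw [List.find?_cons_of_pos hpx, Option.some_inj] at h
        subst h
        refine ⟨0, ?_, ?_⟩
        · rw [List.findIdx?_cons]; simp
        · intro c _ k hk
          rw [List.findIdx?_cons] at hk
          by_cases hxc : x = c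
          · subst hxc
            simp at hk
            exact ⟨Nat.zero_le _, fun _ => rfl⟩
          · have : (x == c) = false := by simp [hxc]
            rw [this] at hk
            simp at hk
            obtain ⟨k', _, hk'⟩ := hk
            exact ⟨Nat.zero_le _, fun hh => absurd hh (by omega)⟩
      · rw [List.find?_cons_of_neg (by simp [hpx])] at h
        obtain ⟨j', hj', hmin⟩ := ih h
        have hxn : x ≠ n := by
          intro hxn
          exact hpx (hxn ▸ List.find?_some h)
        refine ⟨j' + 1, ?_, ?_⟩
        · rw [List.findIdx?_cons]
          have : (x == n) = false := by simp [hxn]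
          rw [this]
          simp [hj']
        · intro c hc k hk
          have hxc : x ≠ c := by
            intro hxc
            exact hpx (hxc ▸ hc)
          rw [List.findIdx?_cons] at hk
          have : (x == c) = false := by simp [hxc]
          rw [this] at hk
          simp at hk
          obtain ⟨k', hk', rfl⟩ := hk
          obtain ⟨h1, h2⟩ := hmin c hc k' hk'
          exact ⟨by omega, fun hkj => h2 (by omega)⟩

-- B's per-ballot step equals A's per-ballot step
lemma ballot_step_eq (counts : PySem.Dict String Int) (ballot all_candidates : List String) :
    (match cfpBest (cfpBuildPos ballot 0 PySem.Dict.empty).items (PySem.Set.ofList all_candidates) none with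
     | some b => counts.modify b.1 0 (· + 1)
     | none => counts) = cfpBallotA counts ballot all_candidates := by
  rw [cfpBallotA_eq_find]
  have hpos : ∀ c : String, (cfpBuildPos ballot 0 PySem.Dict.empty).get? c
      = (ballot.findIdx? (· == c)).map Int.ofNat := by
    intro c
    rw [cfpBuildPos_get?]
    simp only [PySem.Dict.get?_empty]
    cases ballot.findIdx? (· == c) <;> simp [Int.ofNat_eq_natCast]
  have hnd : (cfpBuildPos ballot 0 PySem.Dict.empty).keys.Nodup :=
    cfpBuildPos_nodup ballot 0 _ PySem.Dict.nodup_keys_empty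
  have hsetc : ∀ c : String,
      PySem.Set.contains (PySem.Set.ofList all_candidates) c = all_candidates.contains c := by
    intro c
    simp only [PySem.Set.contains_eq_listContains, List.contains_eq_mem, PySem.Set.mem_ofList]
  have hitems : ∀ p ∈ (cfpBuildPos ballot 0 PySem.Dict.empty).items,
      (cfpBuildPos ballot 0 PySem.Dict.empty).get? p.1 = some p.2 :=
    fun p hp => PySem.Dict.get?_of_mem_items _ (by rw [Prod.mk.eta]; exact hp) hnd
  cases hf : ballot.find? (fun n => all_candidates.contains n) with
  | none =>
      have hnone : cfpBest (cfpBuildPos ballot 0 PySem.Dict.empty).items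
          (PySem.Set.ofList all_candidates) none = none := by
        apply cfpBest_nomatch
        intro p hp
        rw [hsetc]
        have hg := hitems p hp
        rw [hpos p.1] at hg
        cases hfi : ballot.findIdx? (· == p.1) with
        | none => rw [hfi] at hg; cases hg
        | some k =>
            cases hc : all_candidates.contains p.1 with
            | false => rfl
            | true =>
                exfalso
                have hall : ∀ x ∈ ballot, (x == p.1) = false := by
                  intro x hx
                  have hnx := List.find?_eq_none.mp hf x hx
                  simp only [beq_eq_false_iff_ne, ne_eq]
                  intro hxp
                  exact hnx (by rw [hxp]; exact hc)
                rw [List.findIdx?_eq_none_iff.mpr hall] at hfi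
                cases hfi
      rw [hnone]
      rfl
  | some n =>
      obtain ⟨j, hj, hmin⟩ := find?_min_idx hf
      have hn : (cfpBuildPos ballot 0 PySem.Dict.empty).get? n = some (Int.ofNat j) := by
        rw [hpos n, hj]
        rfl
      have hmemn : (n, Int.ofNat j) ∈ (cfpBuildPos ballot 0 PySem.Dict.empty).items :=
        PySem.Dict.mem_items_of_get?_eq_some _ hn
      have hpn : all_candidates.contains n = true := List.find?_some hf
      have hsome : cfpBest (cfpBuildPos ballot 0 PySem.Dict.empty).items
          (PySem.Set.ofList all_candidates) none = some (n, Int.ofNat j) := by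
        refine cfpBest_argmin _ n (Int.ofNat j) (by rw [hsetc]; exact hpn) _ none ?_ ?_
          (Or.inl rfl) (Or.inl hmemn)
        · intro p hp hcp
          have hg := hitems p hp
          rw [hpos p.1, Option.map_eq_some_iff] at hg
          obtain ⟨k', hk', hpk⟩ := hg
          rw [hsetc] at hcp
          obtain ⟨ha, hb⟩ := hmin p.1 hcp k' hk'
          constructor
          · rw [← hpk]
            simp only [Int.ofNat_eq_natCast]
            exact_mod_cast ha
          · intro hpj
            apply hb
            have hkj : Int.ofNat k' = Int.ofNat j := by rw [hpk, hpj]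
            simpa using hkj
        · intro p hp hpn'
          have hg := hitems p hp
          rw [hpn', hpos n, hj] at hg
          exact (Option.some_inj.mp hg).symm
      rw [hsome]
      rfl

-- ===== VERDICT (by name: the statement is the Claim_ definition above) =====
theorem count_first_place_spec : Claim_equal_count_first_place := by
  intro ballots all_candidates _
  unfold Spec_count_first_place count_first_place count_first_place_alt
  have h : ∀ (bs : List (List String)) (d : PySem.Dict String Int),
      bs.foldl (fun d ballot => cfpBallotA d ballot all_candidates) d
        = bs.foldl (fun counts ballot =>
            match cfpBest (cfpBuildPos ballot 0 PySem.Dict.empty).items (PySem.Set.ofList all_candidates) none with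
            | some b => counts.modify b.1 0 (· + 1)
            | none => counts) d := by
    intro bs
    induction bs with
    | nil => intro d; rfl
    | cons b rest ih =>
        intro d
        simp only [List.foldl_cons, ih, ballot_step_eq]
  simp only []
  rw [h]
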